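-- pv_equiv track=rewrite | github.com/Geff115/brand-identity-extractor | app/services/color_extractor.py | _deduplicate_colors
-- ===== SOURCE A (Python) =====
-- from typing import List, Dict, Optional
--
-- def _deduplicate_colors(colors: List[Dict]) -> List[Dict]:
--     """Deduplicate colors by hex value"""
--     unique_colors = {}
--
--     for color in colors:
--         hex_color = color['hex'].lower()
--
--         if hex_color not in unique_colors:
--             unique_colors[hex_color] = color
--         elif color['source'].startswith('logo'):
--             # Prioritize logo colors
--             unique_colors[hex_color] = color
--
--     return list(unique_colors.values())
-- ===== SOURCE B (Python) =====
-- def _deduplicate_colors(colors):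
--     """Deduplicate colors by hex value (group-then-select)."""
--     groups = {}
--     for color in colors:
--         groups.setdefault(color['hex'].lower(), []).append(color)
--     result = []
--     for group in groups.values():
--         logos = [c for c in group if c.get('source', '').startswith('logo')]
--         result.append(logos[-1] if logos else group[0])
--     return result
-- ===== Notes on version B (the rewrite author's own statement) =====
-- stated objective: alternative
-- what changed: Replaces A's single pass that conditionally overwrites a per-hex chosen color with a two-pass group-then-select decomposition: first group all colors by lowercased hex in an insertion-ordered dict, then pick per group the last logo-sourced color if any, else the first occurrence.
import Mathlib
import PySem

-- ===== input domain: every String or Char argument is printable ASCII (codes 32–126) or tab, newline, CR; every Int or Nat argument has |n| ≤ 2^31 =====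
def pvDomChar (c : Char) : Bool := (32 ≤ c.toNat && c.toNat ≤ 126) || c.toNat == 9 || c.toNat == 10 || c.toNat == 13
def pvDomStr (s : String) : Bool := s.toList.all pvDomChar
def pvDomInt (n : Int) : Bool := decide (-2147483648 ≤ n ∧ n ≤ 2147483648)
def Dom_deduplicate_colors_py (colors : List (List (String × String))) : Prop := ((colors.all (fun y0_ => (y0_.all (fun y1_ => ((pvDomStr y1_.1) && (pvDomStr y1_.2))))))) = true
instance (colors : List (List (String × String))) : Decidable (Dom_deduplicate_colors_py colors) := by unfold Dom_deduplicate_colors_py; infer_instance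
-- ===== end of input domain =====

-- B deduplicates by a group-then-select two-pass decomposition instead of A's single priority-update pass
-- (objective: alternative, same O(n) cost). Equivalence is about the return value; neither program mutates its input.

-- ===== PORT A =====
-- color['hex'] / color['source'] on a dict modelled as an assoc list: first match.
-- Python raises KeyError when the key is absent; the port totalizes with getD "" and
-- Pre_ excludes exactly those inputs.
def pvLookup (c : List (String × String)) (k : String) : Option String :=
  (c.find? (fun p => p.1 == k)).map (·.2)

-- hex_color = color['hex'].lower()
def pvHex (c : List (String × String)) : String :=
  PySem.Str.lower ((pvLookup c "hex").getD "")

-- color['source'].startswith('logo')  (B spells it color.get('source','').startswith('logo'))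
def pvIsLogo (c : List (String × String)) : Bool :=
  PySem.Str.startswith ((pvLookup c "source").getD "") "logo"

-- the body of A's loop: if hex not in unique: insert; elif logo: insert (overwrite in place); else skip
def pvStepA (u : PySem.Dict String (List (String × String))) (c : List (String × String)) :
    PySem.Dict String (List (String × String)) :=
  let hx := pvHex c
  if u.contains hx = false then u.insert hx c
  else if pvIsLogo c then u.insert hx c
  else u

def deduplicate_colors_py (colors : List (List (String × String))) : List (List (String × String)) :=
  PySem.Dict.values (colors.foldl pvStepA PySem.Dict.empty)

-- ===== PORT B =====
-- groups.setdefault(hx, []).append(color)  ==  groups[hx] = groups.get(hx, []) + [color]  ==  Dict.modify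
def pvStepB (g : PySem.Dict String (List (List (String × String)))) (c : List (String × String)) :
    PySem.Dict String (List (List (String × String))) :=
  PySem.Dict.modify g (pvHex c) [] (fun l => l ++ [c])

-- logos = [c for c in group if c.get('source','').startswith('logo')]; logos[-1] if logos else group[0]
def pvSelect (g : List (List (String × String))) : List (String × String) :=
  match (g.filter pvIsLogo).getLast? with
  | some c => c
  | none => g.headD []

def deduplicate_colors_py_alt (colors : List (List (String × String))) : List (List (String × String)) :=
  (PySem.Dict.values (colors.foldl pvStepB PySem.Dict.empty)).map pvSelect

-- ===== PRECONDITION & SPEC =====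
-- Pre_ excludes (a) inputs where the Python A raises KeyError: a color without 'hex', or a color whose
-- lowered hex repeats an earlier one but has no 'source'; and (b) assoc lists in which one color carries
-- a duplicate key — no Python dict corresponds to such a value, so nothing about A is claimed there.
def Pre_deduplicate_colors_py (colors : List (List (String × String))) : Prop :=
  (∀ c ∈ colors, (c.map Prod.fst).Nodup) ∧
  (∀ c ∈ colors, (pvLookup c "hex").isSome = true) ∧
  (∀ j, (hj : j < colors.length) → ∀ i, (hi : i < j) →
    pvHex (colors[i]'(hi.trans hj)) = pvHex (colors[j]'hj) →
    (pvLookup (colors[j]'hj) "source").isSome = true)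
instance (colors : List (List (String × String))) : Decidable (Pre_deduplicate_colors_py colors) := by
  unfold Pre_deduplicate_colors_py; infer_instance

def pvWitness_deduplicate_colors_py : (List (List (String × String))) :=
  [[("hex", "#FF0000"), ("source", "css")], [("hex", "#ff0000"), ("source", "logo")]]

def Spec_deduplicate_colors_py (colors : List (List (String × String))) (out : List (List (String × String))) : Prop := out = deduplicate_colors_py_alt colors
instance (colors : List (List (String × String))) (out : List (List (String × String))) : Decidable (Spec_deduplicate_colors_py colors out) := by unfold Spec_deduplicate_colors_py; infer_instance

-- ===== CLAIM (what is proved, stated in full; the proofs are below) =====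
def Claim_equal_deduplicate_colors_py : Prop := ∀ (colors : List (List (String × String))), Dom_deduplicate_colors_py colors → Pre_deduplicate_colors_py colors → Spec_deduplicate_colors_py colors (deduplicate_colors_py colors)

-- ===== LEMMAS AND PROOFS =====

-- the selection rule on a one-element group picks that element
lemma pvSelect_singleton (c : List (String × String)) : pvSelect [c] = c := by
  unfold pvSelect
  cases h : pvIsLogo c <;> simp [List.filter, h]

-- appending a logo color makes it the selected one
lemma pvSelect_append_logo (l : List (List (String × String))) (c : List (String × String))
    (h : pvIsLogo c = true) : pvSelect (l ++ [c]) = c := by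
  unfold pvSelect
  simp [List.filter_append, h]

-- appending a non-logo color never changes the selection of a nonempty group
lemma pvSelect_append_nonlogo (l : List (List (String × String))) (c : List (String × String))
    (h : pvIsLogo c = false) (hl : l ≠ []) : pvSelect (l ++ [c]) = pvSelect l := by
  unfold pvSelect
  rw [List.filter_append]
  simp only [List.filter, h, List.append_nil]
  cases hfin : (l.filter pvIsLogo).getLast? with
  | some c' => rfl
  | none => cases l with
    | nil => exact absurd rfl hl
    | cons a t => simp

-- the loop invariant relating A's dict of chosen colors to B's dict of groups
def pvRel (u : PySem.Dict String (List (String × String)))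
    (g : PySem.Dict String (List (List (String × String)))) : Prop :=
  u.items = g.items.map (fun p => (p.1, pvSelect p.2)) ∧
  (∀ p ∈ g.items, p.2 ≠ []) ∧
  g.keys.Nodup

lemma pvRel_step (u : PySem.Dict String (List (String × String)))
    (g : PySem.Dict String (List (List (String × String)))) (c : List (String × String))
    (h : pvRel u g) : pvRel (pvStepA u c) (pvStepB g c) := by
  obtain ⟨h1, h2, h3⟩ := h
  have hkeys : u.keys = g.keys := by
    simp only [PySem.Dict.keys, h1, List.map_map]; rfl
  have hcont : u.contains (pvHex c) = g.contains (pvHex c) := by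
    rw [PySem.Dict.contains_eq_decide_mem_keys, PySem.Dict.contains_eq_decide_mem_keys, hkeys]
  have hB : pvStepB g c = g.insert (pvHex c) (g.getD (pvHex c) [] ++ [c]) := rfl
  by_cases hc : g.contains (pvHex c) = true
  · -- key already present: B extends the group in place, A overwrites iff the new color is a logo
    have hitemsB : (pvStepB g c).items =
        g.items.map (fun p => if (p.1 == pvHex c) = true then (pvHex c, g.getD (pvHex c) [] ++ [c]) else p) := by
      rw [hB]; exact PySem.Dict.items_insert_of_contains g _ hc
    refine ⟨?_, ?_, ?_⟩
    · cases hl : pvIsLogo c with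
      | true =>
        have hA0 : pvStepA u c = u.insert (pvHex c) c := by
          unfold pvStepA; simp [hcont, hc, hl]
        have hA : (pvStepA u c).items =
            u.items.map (fun p => if (p.1 == pvHex c) = true then (pvHex c, c) else p) := by
          rw [hA0]; exact PySem.Dict.items_insert_of_contains u _ (by rw [hcont]; exact hc)
        rw [hA, h1, hitemsB, List.map_map, List.map_map]
        apply List.map_congr_left
        intro p _
        by_cases hp : p.1 = pvHex c <;>
          simp [Function.comp, hp, pvSelect_append_logo _ _ hl]
      | false =>
        have hA : pvStepA u c = u := by
          unfold pvStepA
          simp [hcont, hc, hl]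
        rw [hA, h1, hitemsB, List.map_map]
        apply List.map_congr_left
        intro p hp
        by_cases hpk : p.1 = pvHex c
        · have hmem : (pvHex c, p.2) ∈ g.items := by rw [← hpk]; exact hp
          have hgd : g.getD (pvHex c) [] = p.2 :=
            PySem.Dict.getD_of_mem_items g hmem h3 []
          simp only [Function.comp, hpk, beq_self_eq_true, if_true, hgd]
          rw [pvSelect_append_nonlogo _ _ hl (h2 p hp)]
        · simp [Function.comp, hpk]
    · intro p hp
      rw [hitemsB] at hp
      obtain ⟨q, hq, rfl⟩ := List.mem_map.mp hp
      by_cases hqk : q.1 = pvHex c <;> simp [hqk]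
      exact h2 q hq
    · rw [hB]; exact PySem.Dict.nodup_keys_insert g _ _ h3
  · -- fresh key: both sides append a new entry, whose one-element group selects the new color
    have hc' : g.contains (pvHex c) = false := by simpa using hc
    have hgd : g.getD (pvHex c) [] = [] := PySem.Dict.getD_of_not_contains g [] hc'
    have hitemsB : (pvStepB g c).items = g.items ++ [(pvHex c, [c])] := by
      rw [hB, hgd]; exact PySem.Dict.items_insert_of_not_contains g _ hc'
    have hA : (pvStepA u c).items = u.items ++ [(pvHex c, c)] := by
      unfold pvStepA
      simp only [hcont, hc', if_true]
      exact PySem.Dict.items_insert_of_not_contains u _ (by rw [hcont]; exact hc')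
    refine ⟨?_, ?_, ?_⟩
    · rw [hA, h1, hitemsB, List.map_append]
      simp [pvSelect_singleton]
    · intro p hp
      rw [hitemsB] at hp
      rcases List.mem_append.mp hp with hp | hp
      · exact h2 p hp
      · simp at hp; subst hp; simp
    · rw [hB]; exact PySem.Dict.nodup_keys_insert g _ _ h3

lemma pvRel_fold (colors : List (List (String × String))) :
    ∀ u g, pvRel u g → pvRel (colors.foldl pvStepA u) (colors.foldl pvStepB g) := by
  induction colors with
  | nil => intro u g h; exact h
  | cons c t ih =>
    intro u g h
    exact ih _ _ (pvRel_step u g c h)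

lemma pvRel_empty : pvRel PySem.Dict.empty PySem.Dict.empty := by
  refine ⟨rfl, ?_, ?_⟩ <;> simp [PySem.Dict.empty, PySem.Dict.keys]

-- ===== VERDICT (by name: the statement is the Claim_ definition above) =====
theorem deduplicate_colors_py_spec : Claim_equal_deduplicate_colors_py := by
  intro colors _hdom _hpre
  unfold Spec_deduplicate_colors_py deduplicate_colors_py deduplicate_colors_py_alt
  obtain ⟨h1, _, _⟩ := pvRel_fold colors PySem.Dict.empty PySem.Dict.empty pvRel_empty
  simp only [PySem.Dict.values, h1, List.map_map]
  rfl
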